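-- pv_equiv track=rewrite | github.com/damianpud/sda_tasks | SDA_python_basics/simple_game/simple_game.py | sort_rank
-- ===== SOURCE A (Python) =====
-- def sort_rank(rank_dict):
--     sort_list = []
--     sort_dict = {}
--     index = 0
--     for key, value in rank_dict.items():
--         sort_list.append(value)
--     sort_list.sort()
--     for i in range(len(sort_list)):
--         for key, value in rank_dict.items():
--                 if sort_list[index] == value:
--                     sort_dict[key] = value
--         index += 1
--     return sort_dict
-- ===== SOURCE B (Python) =====
-- def sort_rank(rank_dict):
--     buckets = {}
--     for key, value in rank_dict.items():
--         buckets.setdefault(value, []).append(key)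
--     result = {}
--     for value in sorted(buckets):
--         for key in buckets[value]:
--             result[key] = value
--     return result
-- ===== Notes on version B (the rewrite author's own statement) =====
-- stated objective: faster
-- what changed: Replaces A's sort-of-all-values followed by a full rescan of the dict for every sorted position with a single grouping pass (value -> list of keys) plus one walk over the sorted distinct values.
import Mathlib
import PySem

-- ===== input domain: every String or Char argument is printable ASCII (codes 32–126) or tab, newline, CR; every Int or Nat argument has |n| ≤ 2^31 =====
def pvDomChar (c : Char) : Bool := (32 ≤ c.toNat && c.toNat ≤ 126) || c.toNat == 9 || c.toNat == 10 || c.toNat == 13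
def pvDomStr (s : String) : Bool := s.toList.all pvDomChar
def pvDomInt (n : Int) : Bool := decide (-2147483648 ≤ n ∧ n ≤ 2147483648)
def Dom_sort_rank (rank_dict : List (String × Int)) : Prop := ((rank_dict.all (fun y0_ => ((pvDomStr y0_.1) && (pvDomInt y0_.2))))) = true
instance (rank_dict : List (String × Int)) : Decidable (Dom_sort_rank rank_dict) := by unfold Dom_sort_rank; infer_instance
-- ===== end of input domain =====

-- B replaces A's sort-then-rescan-per-position with one grouping pass plus a walk over sorted distinct values (faster).

-- ===== PORT A =====
def sort_rank (rank_dict : List (String × Int)) : List (String × Int) :=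
  let sort_list := rank_dict.foldl (fun acc kv => acc ++ [kv.2]) ([] : List Int)
  let sort_list := PySem.List.sorted sort_list (fun x => x) false
  let st :=
    (PySem.List.pyRange 0 (sort_list.length : Int) 1).foldl
      (fun (st : PySem.Dict String Int × Int) _i =>
        (rank_dict.foldl
          (fun (d : PySem.Dict String Int) kv =>
            if PySem.List.pyGet? sort_list st.2 == some kv.2 then d.insert kv.1 kv.2 else d)
          st.1,
         st.2 + 1))
      (PySem.Dict.empty, 0)
  st.1.items

-- ===== PORT B =====
def sort_rank_alt (rank_dict : List (String × Int)) : List (String × Int) :=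
  let buckets : PySem.Dict Int (List String) :=
    rank_dict.foldl (fun b kv => b.modify kv.2 [] (fun ks => ks ++ [kv.1])) PySem.Dict.empty
  let result : PySem.Dict String Int :=
    (PySem.List.sorted buckets.keys (fun x => x) false).foldl
      (fun r v => (buckets.getD v []).foldl (fun r k => r.insert k v) r)
      PySem.Dict.empty
  result.items

-- ===== PRECONDITION & SPEC =====
def Spec_sort_rank (rank_dict : List (String × Int)) (out : List (String × Int)) : Prop := out = sort_rank_alt rank_dict
instance (rank_dict : List (String × Int)) (out : List (String × Int)) : Decidable (Spec_sort_rank rank_dict out) := by unfold Spec_sort_rank; infer_instance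

-- ===== CLAIM (what is proved, stated in full; the proofs are below) =====
def Claim_equal_sort_rank : Prop := ∀ (rank_dict : List (String × Int)), Dom_sort_rank rank_dict → Spec_sort_rank rank_dict (sort_rank rank_dict)

-- ===== LEMMAS AND PROOFS =====

-- the "phase" for one value v: insert (in original order) every key whose value is v, bound to v
def pvPhase (rd : List (String × Int)) (d : PySem.Dict String Int) (v : Int) : PySem.Dict String Int :=
  (rd.filter (fun kv => kv.2 == v)).foldl (fun d kv => d.insert kv.1 v) d

theorem pv_foldl_if_filter {α β : Type} (p : α → Bool) (f : β → α → β) :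
    ∀ (l : List α) (init : β),
      l.foldl (fun d x => if p x then f d x else d) init = (l.filter p).foldl f init := by
  intro l
  induction l with
  | nil => intro init; rfl
  | cons x l ih =>
    intro init
    by_cases h : p x = true
    · simp [h, ih]
    · simp at h
      simp [h, ih]

theorem pv_inner_eq_phase (rd : List (String × Int)) (d : PySem.Dict String Int) (v : Int) :
    rd.foldl (fun d kv => if (v == kv.2) then d.insert kv.1 kv.2 else d) d = pvPhase rd d v := by
  rw [pv_foldl_if_filter]
  unfold pvPhase
  have hf : rd.filter (fun kv => (v == kv.2)) = rd.filter (fun kv => kv.2 == v) := by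
    apply List.filter_congr
    intro kv _
    simp [BEq.comm]
  rw [hf]
  apply PySem.List.foldl_congr_mem
  intro acc kv hkv
  have : kv.2 = v := by
    have := List.of_mem_filter hkv
    simpa using this
  rw [this]

theorem pv_outer_loop (rd : List (String × Int)) (S : List Int) :
    ∀ (n j : Nat) (d : PySem.Dict String Int), S.length - j ≤ n →
      ((PySem.List.pyRange (j : Int) (S.length : Int) 1).foldl
        (fun (st : PySem.Dict String Int × Int) _i =>
          (rd.foldl
            (fun (d : PySem.Dict String Int) kv =>
              if PySem.List.pyGet? S st.2 == some kv.2 then d.insert kv.1 kv.2 else d)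
            st.1,
           st.2 + 1))
        (d, (j : Int))).1
      = (S.drop j).foldl (pvPhase rd) d := by
  intro n
  induction n with
  | zero =>
    intro j d hj
    have hle : S.length ≤ j := by omega
    rw [PySem.List.pyRange_one_eq_nil (by exact_mod_cast hle), List.drop_eq_nil_of_le hle]
    rfl
  | succ n ih =>
    intro j d hj
    by_cases hlt : j < S.length
    · rw [PySem.List.pyRange_one_cons (by exact_mod_cast hlt)]
      rw [List.drop_eq_getElem_cons hlt]
      simp only [List.foldl_cons]
      have hget : PySem.List.pyGet? S (j : Int) = some S[j] := by
        simp [PySem.List.pyGet?, PySem.List.pyIdx?, hlt]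
      have hinner :
          rd.foldl (fun d kv => if PySem.List.pyGet? S (j : Int) == some kv.2 then d.insert kv.1 kv.2 else d) d
            = pvPhase rd d S[j] := by
        rw [← pv_inner_eq_phase]
        apply PySem.List.foldl_congr_mem
        intro acc kv _
        rw [hget]
        simp
      have hcast : ((j : Int) + 1) = ((j + 1 : Nat) : Int) := by push_cast; ring
      rw [hinner, hcast]
      exact ih (j + 1) (pvPhase rd d S[j]) (by omega)
    · have hle : S.length ≤ j := by omega
      rw [PySem.List.pyRange_one_eq_nil (by exact_mod_cast hle), List.drop_eq_nil_of_le hle]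
      rfl

theorem pv_get?_foldl_insert_const (v : Int) :
    ∀ (ks : List String) (d : PySem.Dict String Int) (k : String),
      (ks.foldl (fun d k => d.insert k v) d).get? k = if k ∈ ks then some v else d.get? k := by
  intro ks
  induction ks with
  | nil => intro d k; simp
  | cons k' ks ih =>
    intro d k
    simp only [List.foldl_cons, ih, List.mem_cons]
    by_cases hks : k ∈ ks
    · simp [hks]
    · by_cases hk : k = k'
      · simp [hk, PySem.Dict.get?_insert_self]
      · simp [hks, hk, PySem.Dict.get?_insert_of_ne _ _ hk]

theorem pv_insert_self_eq (d : PySem.Dict String Int) (k : String) (v : Int)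
    (hnd : d.keys.Nodup) (h : d.get? k = some v) : d.insert k v = d := by
  apply PySem.Dict.ext
  have hc : d.contains k = true := by
    rw [PySem.Dict.contains_eq_isSome_get?, h]; rfl
  have hmap : ∀ p ∈ d.items, (if p.1 == k then (k, v) else p) = p := by
    intro p hp
    obtain ⟨a, b⟩ := p
    by_cases hpk : a = k
    · subst hpk
      have hget : d.get? a = some b :=
        PySem.Dict.get?_of_mem_items (d := d) (k := a) (v := b) (by simpa using hp) hnd
      rw [h] at hget
      have hv : b = v := by injection hget with h'; omega
      simp [hv]
    · simp [hpk]
  rw [PySem.Dict.items_insert]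
  simp only [hc, if_true]
  rw [List.map_congr_left hmap]
  simp

theorem pv_foldl_insert_const_nodup (v : Int) :
    ∀ (ks : List String) (d : PySem.Dict String Int), d.keys.Nodup →
      (ks.foldl (fun d k => d.insert k v) d).keys.Nodup := by
  intro ks d h
  exact PySem.Dict.nodup_keys_foldl_insert ks (fun _ _ => v) d h

theorem pv_foldl_insert_const_idem (v : Int) :
    ∀ (ks : List String) (d : PySem.Dict String Int), d.keys.Nodup →
      (∀ k ∈ ks, d.get? k = some v) → ks.foldl (fun d k => d.insert k v) d = d := by
  intro ks
  induction ks with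
  | nil => intro d _ _; rfl
  | cons k ks ih =>
    intro d hnd h
    simp only [List.foldl_cons]
    rw [pv_insert_self_eq d k v hnd (h k (List.mem_cons_self))]
    exact ih d hnd (fun k' hk' => h k' (List.mem_cons_of_mem _ hk'))

theorem pvPhase_eq_keys_foldl (rd : List (String × Int)) (d : PySem.Dict String Int) (v : Int) :
    pvPhase rd d v = ((rd.filter (fun kv => kv.2 == v)).map (·.1)).foldl (fun d k => d.insert k v) d := by
  unfold pvPhase
  rw [List.foldl_map]

theorem pvPhase_nodup (rd : List (String × Int)) (d : PySem.Dict String Int) (v : Int)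
    (h : d.keys.Nodup) : (pvPhase rd d v).keys.Nodup := by
  rw [pvPhase_eq_keys_foldl]
  exact pv_foldl_insert_const_nodup v _ d h

theorem pvPhase_idem (rd : List (String × Int)) (d : PySem.Dict String Int) (v : Int)
    (h : d.keys.Nodup) : pvPhase rd (pvPhase rd d v) v = pvPhase rd d v := by
  rw [pvPhase_eq_keys_foldl rd (pvPhase rd d v) v]
  apply pv_foldl_insert_const_idem
  · exact pvPhase_nodup rd d v h
  · intro k hk
    rw [pvPhase_eq_keys_foldl, pv_get?_foldl_insert_const]
    simp [hk]

theorem pv_collapse (rd : List (String × Int)) :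
    ∀ (n : Nat) (S T : List Int) (d : PySem.Dict String Int), S.length ≤ n →
      S.Pairwise (· ≤ ·) → T.Pairwise (· < ·) → (∀ x, x ∈ S ↔ x ∈ T) → d.keys.Nodup →
      S.foldl (pvPhase rd) d = T.foldl (pvPhase rd) d := by
  intro n
  induction n with
  | zero =>
    intro S T d hn _ _ hmem _
    have hS : S = [] := List.eq_nil_of_length_eq_zero (by omega)
    subst hS
    have hT : T = [] := by
      cases T with
      | nil => rfl
      | cons t T' => exact absurd ((hmem t).2 List.mem_cons_self) (List.not_mem_nil)
    subst hT; rfl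
  | succ n ih =>
    intro S T d hn hS hT hmem hnd
    cases S with
    | nil =>
      have hT0 : T = [] := by
        cases T with
        | nil => rfl
        | cons t T' => exact absurd ((hmem t).2 List.mem_cons_self) (List.not_mem_nil)
      subst hT0; rfl
    | cons v S1 =>
      -- head of T is v
      obtain ⟨t, T', rfl⟩ : ∃ t T', T = t :: T' := by
        cases T with
        | nil => exact absurd ((hmem v).1 List.mem_cons_self) (List.not_mem_nil)
        | cons t T' => exact ⟨t, T', rfl⟩
      have hvle : ∀ x ∈ S1, v ≤ x := (List.pairwise_cons.1 hS).1
      have htlt : ∀ x ∈ T', t < x := (List.pairwise_cons.1 hT).1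
      have htv : t = v := by
        have htS : t ∈ v :: S1 := (hmem t).2 List.mem_cons_self
        have hvT : v ∈ t :: T' := (hmem v).1 List.mem_cons_self
        rcases List.mem_cons.1 htS with h1 | h1
        · exact h1
        · rcases List.mem_cons.1 hvT with h2 | h2
          · exact h2.symm
          · have := htlt v h2
            have := hvle t h1
            omega
      have htv' : v = t := htv.symm
      subst htv'
      cases S1 with
      | nil =>
        have hT'0 : T' = [] := by
          cases T' with
          | nil => rfl
          | cons u T2 =>
            have hu : u ∈ [v] := (hmem u).2 (List.mem_cons_of_mem _ List.mem_cons_self)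
            have : u = v := by simpa using hu
            have := htlt u List.mem_cons_self
            omega
        subst hT'0; rfl
      | cons w S2 =>
        by_cases hwv : w = v
        · subst hwv
          -- collapse the duplicated head
          have hstep : (w :: w :: S2).foldl (pvPhase rd) d = (w :: S2).foldl (pvPhase rd) d := by
            simp only [List.foldl_cons]
            rw [pvPhase_idem rd d w hnd]
          rw [hstep]
          apply ih (w :: S2) (w :: T') d (by simp at hn ⊢; omega)
          · exact (List.pairwise_cons.1 hS).2
          · exact hT
          · intro x
            constructor
            · intro hx
              exact (hmem x).1 (by
                rcases List.mem_cons.1 hx with h | h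
                · exact h ▸ List.mem_cons_self
                · exact List.mem_cons_of_mem _ (List.mem_cons_of_mem _ h))
            · intro hx
              rcases List.mem_cons.1 ((hmem x).2 hx) with h | h
              · exact h ▸ List.mem_cons_self
              · exact h
          · exact hnd
        · -- v occurs exactly once at the head of S; recurse on the tails
          have hvnotS1 : v ∉ w :: S2 := by
            intro hv
            rcases List.mem_cons.1 hv with h | h
            · exact hwv h.symm
            · have hwle : ∀ x ∈ S2, w ≤ x := (List.pairwise_cons.1 (List.pairwise_cons.1 hS).2).1
              have h1 := hwle v h
              have h2 := hvle w List.mem_cons_self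
              exact hwv (by omega)
          simp only [List.foldl_cons]
          apply ih (w :: S2) T' (pvPhase rd d v) (by simp at hn ⊢; omega)
          · exact (List.pairwise_cons.1 hS).2
          · exact (List.pairwise_cons.1 hT).2
          · intro x
            constructor
            · intro hx
              have hxv : x ≠ v := fun h => hvnotS1 (h ▸ hx)
              rcases List.mem_cons.1 ((hmem x).1 (List.mem_cons_of_mem _ hx)) with h | h
              · exact absurd h hxv
              · exact h
            · intro hx
              have hxv : x ≠ v := by
                intro h
                have := htlt x hx
                omega
              rcases List.mem_cons.1 ((hmem x).2 (List.mem_cons_of_mem _ hx)) with h | h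
              · exact absurd h hxv
              · exact h
          · exact pvPhase_nodup rd d v hnd

theorem pv_A_eq (rd : List (String × Int)) :
    sort_rank rd = ((PySem.List.sorted (rd.map (·.2)) (fun x => x) false).foldl (pvPhase rd) PySem.Dict.empty).items := by
  unfold sort_rank
  simp only [PySem.List.foldl_append_singleton_eq_map, List.nil_append]
  have hsnd : List.map Prod.snd rd = List.map (fun x : String × Int => x.2) rd := rfl
  rw [hsnd]
  have h0 : ((0 : Int)) = ((0 : Nat) : Int) := rfl
  rw [h0, pv_outer_loop rd (PySem.List.sorted (rd.map (·.2)) (fun x => x) false)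
        (PySem.List.sorted (rd.map (·.2)) (fun x => x) false).length 0 PySem.Dict.empty (by omega)]
  rw [List.drop_zero]

theorem pv_buckets_getD (rd : List (String × Int)) (v : Int) :
    (rd.foldl (fun b kv => b.modify kv.2 [] (fun ks => ks ++ [kv.1])) (PySem.Dict.empty : PySem.Dict Int (List String))).getD v []
      = (rd.filter (fun kv => kv.2 == v)).map (·.1) := by
  have hmap : rd.foldl (fun b kv => b.modify kv.2 [] (fun ks => ks ++ [kv.1])) (PySem.Dict.empty : PySem.Dict Int (List String))
      = (rd.map (fun kv => (kv.2, kv.1))).foldl (fun b p => b.modify p.1 [] (fun ks => ks ++ [p.2])) PySem.Dict.empty := by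
    rw [List.foldl_map]
  rw [hmap, PySem.Dict.getD_foldl_modify_append]
  rw [List.filter_map]
  rw [List.map_map]
  simp [PySem.Dict.getD_empty, Function.comp_def]

theorem pv_buckets_keys (rd : List (String × Int)) :
    (rd.foldl (fun b kv => b.modify kv.2 [] (fun ks => ks ++ [kv.1])) (PySem.Dict.empty : PySem.Dict Int (List String))).keys
      = PySem.Set.ofList (rd.map (·.2)) := by
  rw [PySem.Dict.keys_foldl_modify_key]
  simp [PySem.Dict.keys_empty]
  rfl

theorem pv_B_eq (rd : List (String × Int)) :
    sort_rank_alt rd = ((PySem.List.sorted (PySem.Set.ofList (rd.map (·.2))) (fun x => x) false).foldl (pvPhase rd) PySem.Dict.empty).items := by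
  unfold sort_rank_alt
  simp only [pv_buckets_keys]
  congr 1
  apply PySem.List.foldl_congr_mem
  intro acc v _
  rw [pv_buckets_getD, pvPhase_eq_keys_foldl]

-- ===== VERDICT (by name: the statement is the Claim_ definition above) =====
theorem sort_rank_spec : Claim_equal_sort_rank := by
  intro rd _
  unfold Spec_sort_rank
  rw [pv_A_eq, pv_B_eq]
  congr 1
  apply pv_collapse rd (PySem.List.sorted (rd.map (·.2)) (fun x => x) false).length
  · omega
  · simpa using PySem.List.sorted_pairwise (rd.map (·.2)) (fun x => x)
  · exact PySem.List.sorted_ofList_pairwise_lt (rd.map (·.2))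
  · intro x
    rw [PySem.List.mem_sorted, PySem.List.mem_sorted, PySem.Set.mem_ofList]
  · exact PySem.Dict.nodup_keys_empty
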